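-- pv_equiv track=rewrite | github.com/Leavone/battle_ships | src/utils.py | ships_touch_or_overlap
-- ===== SOURCE A (Python) =====
-- from typing import List, Tuple
--
-- BOARD_SIZE = 10
--
-- Coord = Tuple[int, int]
--
-- Ship = List[Coord]
--
-- def in_bounds(coord: Coord) -> bool:
--     """
--     Checks if a coordinate is within the bounds of the board (0 <= row, col < 10).
--     """
--     return 0 <= coord[0] < BOARD_SIZE and 0 <= coord[1] < BOARD_SIZE
--
-- def get_adjacent_and_diagonal_cells(coord: Coord) -> List[Coord]:
--     """
--     Returns a list of adjacent and diagonal cells around a given coordinate.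
--     """
--     row, col = coord
--     directions = [
--         (-1, 0),
--         (1, 0),
--         (0, -1),
--         (0, 1),  # Up, Down, Left, Right
--         (-1, -1),
--         (-1, 1),
--         (1, -1),
--         (1, 1),
--     ]  # Diagonals
--     return [
--         (row + dr, col + dc) for dr, dc in directions if in_bounds((row + dr, col + dc))
--     ]
--
-- def ships_touch_or_overlap(ships: List[Ship]) -> bool:
--     """
--     Checks if any ships overlap or touch (including diagonally).
--     """
--     for ship in ships:
--         for coord in ship:
--             # Check for overlap/touching with other ships
--             for other_ship in ships:
--                 if coord in other_ship:
--                     continue  # Skip checking the ship itself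
--                 adjacent_cells = get_adjacent_and_diagonal_cells(coord)
--                 if any(cell in other_ship for cell in adjacent_cells):
--                     return True
--     return False
-- ===== SOURCE B (Python) =====
-- BOARD_SIZE = 10
--
-- def ships_touch_or_overlap(ships):
--     # One pass builds cell -> set of indices of ships occupying it; then each
--     # occupied cell checks its 8 in-bounds neighbours by dict lookup.
--     occ = {}
--     for i, ship in enumerate(ships):
--         for c in ship:
--             occ.setdefault(c, set()).add(i)
--     for (r, cl), here in occ.items():
--         for dr in (-1, 0, 1):
--             for dc in (-1, 0, 1):
--                 if dr == 0 and dc == 0: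
--                     continue
--                 nr, nc = r + dr, cl + dc
--                 if 0 <= nr < BOARD_SIZE and 0 <= nc < BOARD_SIZE:
--                     if occ.get((nr, nc), set()) - here:
--                         return True
--     return False
-- ===== Notes on version B (the rewrite author's own statement) =====
-- stated objective: faster
-- what changed: Replaces A's triple nested scan (every cell of every ship rescanned against every ship list) by a single pass building a cell-to-ship-index dictionary, then one 8-neighbour dict lookup per occupied cell with a set difference of occupying indices.
import Mathlib
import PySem

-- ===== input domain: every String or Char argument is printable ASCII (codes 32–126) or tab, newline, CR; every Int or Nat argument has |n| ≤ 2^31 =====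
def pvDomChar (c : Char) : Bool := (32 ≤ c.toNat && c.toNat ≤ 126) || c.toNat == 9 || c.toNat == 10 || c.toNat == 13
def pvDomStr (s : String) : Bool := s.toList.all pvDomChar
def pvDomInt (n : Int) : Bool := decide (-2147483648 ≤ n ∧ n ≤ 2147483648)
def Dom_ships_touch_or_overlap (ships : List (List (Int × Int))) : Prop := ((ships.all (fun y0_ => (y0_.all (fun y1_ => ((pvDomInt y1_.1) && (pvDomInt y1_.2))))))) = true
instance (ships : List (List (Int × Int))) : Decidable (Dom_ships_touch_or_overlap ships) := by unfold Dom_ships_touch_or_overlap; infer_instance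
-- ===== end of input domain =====

-- B replaces A's triple scan over ships by a one-pass cell→ship-index dict plus 8 neighbour lookups per occupied cell (alternative algorithm; asymptotically fewer scans).

-- ===== PORT A =====
def inBounds (coord : Int × Int) : Bool :=
  decide (0 ≤ coord.1) && decide (coord.1 < 10) && (decide (0 ≤ coord.2) && decide (coord.2 < 10))

def pvDirections : List (Int × Int) :=
  [(-1, 0), (1, 0), (0, -1), (0, 1), (-1, -1), (-1, 1), (1, -1), (1, 1)]

def getAdjacentAndDiagonalCells (coord : Int × Int) : List (Int × Int) :=
  (pvDirections.filter (fun d => inBounds (coord.1 + d.1, coord.2 + d.2))).map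
    (fun d => (coord.1 + d.1, coord.2 + d.2))

def ships_touch_or_overlap (ships : List (List (Int × Int))) : Bool :=
  ships.any fun ship =>
    ship.any fun coord =>
      ships.any fun other =>
        if other.contains coord then false
        else (getAdjacentAndDiagonalCells coord).any fun cell => other.contains cell

-- ===== PORT B =====
-- occ : cell → set of indices of the ships occupying that cell (one pass)
def pvOcc (ships : List (List (Int × Int))) : PySem.Dict (Int × Int) (PySem.Set Int) :=
  (PySem.List.enumerate ships).foldl
    (fun d p =>
      p.2.foldl (fun d c => d.modify c PySem.Set.empty (fun s => PySem.Set.add s p.1)) d)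
    PySem.Dict.empty

def ships_touch_or_overlap_alt (ships : List (List (Int × Int))) : Bool :=
  let occ := pvOcc ships
  occ.items.any fun pr =>
    [(-1 : Int), 0, 1].any fun dr =>
      [(-1 : Int), 0, 1].any fun dc =>
        if dr = 0 ∧ dc = 0 then false
        else
          if 0 ≤ pr.1.1 + dr ∧ pr.1.1 + dr < 10 ∧ 0 ≤ pr.1.2 + dc ∧ pr.1.2 + dc < 10 then
            !((PySem.Set.diff (occ.getD (pr.1.1 + dr, pr.1.2 + dc) PySem.Set.empty) pr.2).isEmpty)
          else false

-- ===== PRECONDITION & SPEC =====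
def Spec_ships_touch_or_overlap (ships : List (List (Int × Int))) (out : Bool) : Prop := out = ships_touch_or_overlap_alt ships
instance (ships : List (List (Int × Int))) (out : Bool) : Decidable (Spec_ships_touch_or_overlap ships out) := by unfold Spec_ships_touch_or_overlap; infer_instance

-- ===== CLAIM (what is proved, stated in full; the proofs are below) =====
def Claim_equal_ships_touch_or_overlap : Prop := ∀ (ships : List (List (Int × Int))), Dom_ships_touch_or_overlap ships → Spec_ships_touch_or_overlap ships (ships_touch_or_overlap ships)

-- ===== LEMMAS AND PROOFS =====

-- the common characterisation: some cell c of ship j has an in-bounds neighbour belonging to a ship k that does not contain c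
def pvTouch (ships : List (List (Int × Int))) : Prop :=
  ∃ (c : Int × Int) (j k : Nat), ∃ _ : j < ships.length, ∃ _ : k < ships.length,
    c ∈ ships[j] ∧ c ∉ ships[k] ∧
    ∃ d ∈ pvDirections, inBounds (c.1 + d.1, c.2 + d.2) = true ∧ (c.1 + d.1, c.2 + d.2) ∈ ships[k]

theorem pv_enum_mem {α : Type} (xs : List α) (s : Int) (p : Int × α) :
    p ∈ PySem.List.enumerate xs s ↔ ∃ (k : Nat), ∃ _ : k < xs.length, p = (s + k, xs[k]) := by
  induction xs generalizing s with
  | nil => simp [PySem.List.enumerate]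
  | cons x t ih =>
    show p ∈ (s, x) :: PySem.List.enumerate t (s + 1) ↔ _
    simp only [List.mem_cons, ih]
    constructor
    · rintro (rfl | ⟨k, hk, rfl⟩)
      · exact ⟨0, by simp, by simp⟩
      · exact ⟨k + 1, by simpa using hk, by simp; omega⟩
    · rintro ⟨k, hk, rfl⟩
      cases k with
      | zero => left; simp
      | succ k => right; exact ⟨k, by simpa using hk, by simp; omega⟩

theorem pv_inner_getD (ship : List (Int × Int)) (d : PySem.Dict (Int × Int) (PySem.Set Int))
    (i : Int) (x : Int × Int) (j : Int) :
    j ∈ (ship.foldl (fun d c => d.modify c PySem.Set.empty (fun s => PySem.Set.add s i)) d).getD x PySem.Set.empty ↔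
      j ∈ d.getD x PySem.Set.empty ∨ (j = i ∧ x ∈ ship) := by
  induction ship generalizing d with
  | nil => simp
  | cons c t ih =>
    simp only [List.foldl_cons, ih, List.mem_cons]
    rw [PySem.Dict.getD_modify]
    rcases eq_or_ne x c with hx | hx
    · subst hx
      simp [PySem.Set.mem_add]
      tauto
    · simp only [if_neg hx]
      tauto

theorem pv_outer_getD (l : List (Int × List (Int × Int))) (d : PySem.Dict (Int × Int) (PySem.Set Int))
    (x : Int × Int) (j : Int) :
    j ∈ (l.foldl (fun d p => p.2.foldl (fun d c => d.modify c PySem.Set.empty (fun s => PySem.Set.add s p.1)) d) d).getD x PySem.Set.empty ↔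
      j ∈ d.getD x PySem.Set.empty ∨ ∃ p ∈ l, j = p.1 ∧ x ∈ p.2 := by
  induction l generalizing d with
  | nil => simp
  | cons p t ih =>
    simp only [List.foldl_cons, ih, pv_inner_getD, List.mem_cons]
    constructor
    · rintro ((h | h) | h)
      · exact Or.inl h
      · exact Or.inr ⟨p, Or.inl rfl, h⟩
      · obtain ⟨q, hq, h⟩ := h; exact Or.inr ⟨q, Or.inr hq, h⟩
    · rintro (h | ⟨q, (rfl | hq), h⟩)
      · exact Or.inl (Or.inl h)
      · exact Or.inl (Or.inr h)
      · exact Or.inr ⟨q, hq, h⟩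

theorem pv_occ_getD (ships : List (List (Int × Int))) (x : Int × Int) (j : Int) :
    j ∈ (pvOcc ships).getD x PySem.Set.empty ↔
      ∃ (k : Nat), ∃ _ : k < ships.length, j = (k : Int) ∧ x ∈ ships[k] := by
  unfold pvOcc
  rw [pv_outer_getD]
  simp only [PySem.Dict.getD_empty]
  constructor
  · rintro (h | ⟨p, hp, rfl, hx⟩)
    · simp at h
    · obtain ⟨k, hk, rfl⟩ := (pv_enum_mem ships 0 p).mp hp
      exact ⟨k, hk, by simp, by simpa using hx⟩
  · rintro ⟨k, hk, rfl, hx⟩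
    exact Or.inr ⟨((k : Int), ships[k]), (pv_enum_mem ships 0 _).mpr ⟨k, hk, by simp⟩, rfl, hx⟩

theorem pv_outer_keys (l : List (Int × List (Int × Int))) (d : PySem.Dict (Int × Int) (PySem.Set Int))
    (x : Int × Int) :
    x ∈ (l.foldl (fun d p => p.2.foldl (fun d c => d.modify c PySem.Set.empty (fun s => PySem.Set.add s p.1)) d) d).keys ↔
      x ∈ d.keys ∨ ∃ p ∈ l, x ∈ p.2 := by
  induction l generalizing d with
  | nil => simp
  | cons p t ih =>
    simp only [List.foldl_cons, ih]
    rw [PySem.Dict.keys_foldl_modify p.2 PySem.Set.empty (fun _ _ s => PySem.Set.add s p.1) d]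
    rw [PySem.Set.mem_update]
    simp only [List.mem_cons]
    constructor
    · rintro ((h | h) | ⟨q, hq, h⟩)
      · exact Or.inl h
      · exact Or.inr ⟨p, Or.inl rfl, h⟩
      · exact Or.inr ⟨q, Or.inr hq, h⟩
    · rintro (h | ⟨q, (rfl | hq), h⟩)
      · exact Or.inl (Or.inl h)
      · exact Or.inl (Or.inr h)
      · exact Or.inr ⟨q, hq, h⟩

theorem pv_occ_keys (ships : List (List (Int × Int))) (x : Int × Int) :
    x ∈ (pvOcc ships).keys ↔ ∃ s ∈ ships, x ∈ s := by
  unfold pvOcc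
  rw [pv_outer_keys]
  simp only [PySem.Dict.keys_empty]
  constructor
  · rintro (h | ⟨p, hp, hx⟩)
    · simp at h
    · obtain ⟨k, hk, rfl⟩ := (pv_enum_mem ships 0 p).mp hp
      exact ⟨ships[k], by simp, by simpa using hx⟩
  · rintro ⟨s, hs, hx⟩
    obtain ⟨k, hk, rfl⟩ := List.mem_iff_getElem.mp hs
    exact Or.inr ⟨((k : Int), ships[k]), (pv_enum_mem ships 0 _).mpr ⟨k, hk, by simp⟩, hx⟩

theorem pv_outer_nodup (l : List (Int × List (Int × Int))) (d : PySem.Dict (Int × Int) (PySem.Set Int))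
    (h : d.keys.Nodup) :
    (l.foldl (fun d p => p.2.foldl (fun d c => d.modify c PySem.Set.empty (fun s => PySem.Set.add s p.1)) d) d).keys.Nodup := by
  induction l generalizing d with
  | nil => exact h
  | cons p t ih =>
    simp only [List.foldl_cons]
    exact ih _ (PySem.Dict.nodup_keys_foldl_modify_key p.2 (fun c => c) PySem.Set.empty
      (fun _ _ s => PySem.Set.add s p.1) d h)

theorem pv_occ_nodup (ships : List (List (Int × Int))) : (pvOcc ships).keys.Nodup :=
  pv_outer_nodup _ _ (by simp)

theorem pv_occ_items (ships : List (List (Int × Int))) (pr : (Int × Int) × PySem.Set Int) :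
    pr ∈ (pvOcc ships).items ↔ pr.1 ∈ (pvOcc ships).keys ∧ pr.2 = (pvOcc ships).getD pr.1 PySem.Set.empty := by
  constructor
  · intro h
    refine ⟨PySem.Dict.mem_keys_of_mem_items _ h, ?_⟩
    exact (PySem.Dict.getD_of_mem_items (d := pvOcc ships) (k := pr.1) (v := pr.2)
      (d0 := PySem.Set.empty) (by exact h) (pv_occ_nodup ships)).symm
  · rintro ⟨hk, hv⟩
    have hc : (pvOcc ships).contains pr.1 = true := (PySem.Dict.contains_iff_mem_keys _ _).mpr hk
    rw [PySem.Dict.contains_eq_isSome_get?] at hc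
    obtain ⟨v, hv'⟩ := Option.isSome_iff_exists.mp hc
    have hpv : pr.2 = v := by rw [hv, PySem.Dict.getD_of_get?_eq_some _ PySem.Set.empty hv']
    have hmem := PySem.Dict.mem_items_of_get?_eq_some _ hv'
    rw [← hpv] at hmem
    exact (Prod.mk.eta (p := pr)) ▸ hmem

theorem pv_dir_bridge (dr dc : Int) :
    (dr ∈ [(-1 : Int), 0, 1] ∧ dc ∈ [(-1 : Int), 0, 1] ∧ ¬(dr = 0 ∧ dc = 0)) ↔
      (dr, dc) ∈ pvDirections := by
  simp [pvDirections, Prod.ext_iff]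
  omega

theorem pv_A_iff (ships : List (List (Int × Int))) :
    ships_touch_or_overlap ships = true ↔ pvTouch ships := by
  unfold ships_touch_or_overlap pvTouch
  simp only [List.any_eq_true, Bool.if_false_left, Bool.and_eq_true, Bool.not_eq_true',
    List.contains_eq_mem, decide_eq_false_iff_not, getAdjacentAndDiagonalCells,
    List.mem_map, List.mem_filter, decide_eq_true_eq]
  constructor
  · rintro ⟨ship, hship, c, hc, other, hother, hnot, cell, ⟨d, ⟨hd, hb⟩, rfl⟩, hcell⟩
    obtain ⟨j, hj, rfl⟩ := List.mem_iff_getElem.mp hship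
    obtain ⟨k, hk, rfl⟩ := List.mem_iff_getElem.mp hother
    exact ⟨c, j, k, hj, hk, hc, hnot, d, hd, hb, hcell⟩
  · rintro ⟨c, j, k, hj, hk, hc, hnot, d, hd, hb, hcell⟩
    exact ⟨ships[j], by simp, c, hc, ships[k], by simp, hnot, _, ⟨d, ⟨hd, hb⟩, rfl⟩, hcell⟩

theorem pv_B_iff (ships : List (List (Int × Int))) :
    ships_touch_or_overlap_alt ships = true ↔ pvTouch ships := by
  unfold ships_touch_or_overlap_alt pvTouch
  simp only [List.any_eq_true]
  constructor
  · rintro ⟨pr, hpr, dr, hdr, dc, hdc, h⟩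
    split_ifs at h with h0 hbnd
    rw [Bool.not_eq_true', List.isEmpty_eq_false_iff_exists_mem] at h
    obtain ⟨i, hi⟩ := h
    rw [PySem.Set.mem_diff] at hi
    obtain ⟨hin, hout⟩ := hi
    obtain ⟨hkmem, hval⟩ := (pv_occ_items ships pr).mp hpr
    obtain ⟨k, hk, rfl, hnk⟩ := (pv_occ_getD ships _ i).mp hin
    rw [hval] at hout
    have hnc : pr.1 ∉ ships[k] := by
      intro hmem
      exact hout ((pv_occ_getD ships pr.1 (k : Int)).mpr ⟨k, hk, rfl, hmem⟩)
    obtain ⟨s, hs, hcs⟩ := (pv_occ_keys ships pr.1).mp hkmem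
    obtain ⟨j, hj, rfl⟩ := List.mem_iff_getElem.mp hs
    refine ⟨pr.1, j, k, hj, hk, hcs, hnc, (dr, dc), (pv_dir_bridge dr dc).mp ⟨hdr, hdc, h0⟩, ?_, hnk⟩
    simp only [inBounds]
    simp only [Bool.and_eq_true, decide_eq_true_eq]
    omega
  · rintro ⟨c, j, k, hj, hk, hc, hnc, d, hd, hb, hcell⟩
    obtain ⟨hdr, hdc, h0⟩ := (pv_dir_bridge d.1 d.2).mpr hd
    have hkey : c ∈ (pvOcc ships).keys := (pv_occ_keys ships c).mpr ⟨ships[j], by simp, hc⟩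
    refine ⟨(c, (pvOcc ships).getD c PySem.Set.empty),
      (pv_occ_items ships _).mpr ⟨hkey, rfl⟩, d.1, hdr, d.2, hdc, ?_⟩
    rw [if_neg h0]
    have hbnd : (0 ≤ c.1 + d.1 ∧ c.1 + d.1 < 10 ∧ 0 ≤ c.2 + d.2 ∧ c.2 + d.2 < 10) := by
      simp only [inBounds, Bool.and_eq_true, decide_eq_true_eq] at hb
      omega
    rw [if_pos hbnd]
    simp only [Bool.not_eq_true', List.isEmpty_eq_false_iff_exists_mem]
    refine ⟨(k : Int), (PySem.Set.mem_diff _ _ _).mpr ⟨?_, ?_⟩⟩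
    · exact (pv_occ_getD ships _ _).mpr ⟨k, hk, rfl, hcell⟩
    · intro hmem
      obtain ⟨k', hk', hkk', hck'⟩ := (pv_occ_getD ships c (k : Int)).mp hmem
      have : k' = k := by exact_mod_cast hkk'.symm
      subst this
      exact hnc hck'

-- ===== VERDICT (by name: the statement is the Claim_ definition above) =====
theorem ships_touch_or_overlap_spec : Claim_equal_ships_touch_or_overlap := by
  intro ships _
  unfold Spec_ships_touch_or_overlap
  exact Bool.eq_iff_iff.mpr ((pv_A_iff ships).trans (pv_B_iff ships).symm)
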